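-- pv_equiv track=rewrite | github.com/BenTaylor25/AdventOfCode | 2024/day03/python/conditional_memory.py | remove_between
-- ===== SOURCE A (Python) =====
-- def remove_between(string, remove_delim, include_delim):
--     including = True
--
--     new_string = ""
--
--     for idx in range(0, len(string)):
--         if string.startswith(remove_delim, idx):
--             including = False
--         if string.startswith(include_delim, idx):
--             including = True
--
--         if including:
--             new_string += string[idx]
--
--     return new_string
-- ===== SOURCE B (Python) =====
-- def _find_off(string, remove_delim, include_delim, i):
--     # first j >= i where remove_delim matches and include_delim does not; len(string) if none
--     n = len(string)
--     while True:
--         j = string.find(remove_delim, i)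
--         if j < 0 or j >= n:
--             return n
--         if string.startswith(include_delim, j):
--             i = j + 1
--         else:
--             return j
--
--
-- def _find_on(string, include_delim, i):
--     # first j >= i (j < n) where include_delim matches; len(string) if none
--     n = len(string)
--     j = string.find(include_delim, i)
--     return n if j < 0 or j >= n else j
--
--
-- def remove_between(string, remove_delim, include_delim):
--     n = len(string)
--     parts = []
--     i = 0
--     while True:
--         j = _find_off(string, remove_delim, include_delim, i)
--         parts.append(string[i:j])
--         if j >= n:
--             break
--         k = _find_on(string, include_delim, j)
--         if k >= n:
--             break
--         i = k
--     return "".join(parts)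
-- ===== Notes on version B (the rewrite author's own statement) =====
-- stated objective: faster
-- what changed: Instead of testing both delimiters with startswith at every single index while toggling a flag, B uses str.find to jump directly between toggle positions and slices out the whole included regions, joining them at the end.
import Mathlib
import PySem

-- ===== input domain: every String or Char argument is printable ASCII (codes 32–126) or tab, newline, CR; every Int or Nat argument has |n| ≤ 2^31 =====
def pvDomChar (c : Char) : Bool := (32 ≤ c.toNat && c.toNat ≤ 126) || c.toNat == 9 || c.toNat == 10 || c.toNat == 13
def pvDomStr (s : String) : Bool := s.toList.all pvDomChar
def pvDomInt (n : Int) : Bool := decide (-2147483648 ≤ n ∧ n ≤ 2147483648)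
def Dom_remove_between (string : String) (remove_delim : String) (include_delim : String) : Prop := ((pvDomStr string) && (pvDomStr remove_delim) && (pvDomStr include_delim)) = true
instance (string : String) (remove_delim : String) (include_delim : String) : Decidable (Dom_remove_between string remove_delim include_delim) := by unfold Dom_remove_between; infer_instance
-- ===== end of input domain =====

-- B replaces A's per-index double-startswith scan with str.find jumps between
-- toggle positions, slicing out the included regions (measured much faster).

-- ===== PORT A =====
-- A: for idx in range(len(string)): toggle `including` on startswith hits, append current char if including.
-- string.startswith(d, idx) is ported as PySem.Chars.startswith on (s.drop idx) — exact for 0 ≤ idx ≤ len(s),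
-- and idx drawn from range(0, len(s)) is always such. string[idx] is PySem.List.pyGet? (always some here);
-- its .toList ([c] / []) appends the char exactly when Python does.
-- loop body of A's for-loop (named so the proofs can refer to it)
def pvAStep (s rem incl : List Char) (st : Bool × List Char) (idx : Int) : Bool × List Char :=
  let including := if PySem.Chars.startswith (s.drop idx.toNat) rem then false else st.1
  let including := if PySem.Chars.startswith (s.drop idx.toNat) incl then true else including
  if including then (including, st.2 ++ (PySem.List.pyGet? s idx).toList) else (including, st.2)

def remove_between (string : String) (remove_delim : String) (include_delim : String) : String :=
  let s := string.toList
  let res := (PySem.List.pyRange 0 (s.length : Int) 1).foldl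
    (pvAStep s remove_delim.toList include_delim.toList) (true, ([] : List Char))
  String.ofList res.2

-- ===== PORT B =====
-- _find_off: loop `j = string.find(remove_delim, i); skip j if include_delim also matches there`.
-- The while-True loop is ported with fuel (each pass moves i past j ≥ i, so fuel len+1 never runs out).
def pvFindOff (s rem incl : List Char) : Nat → Nat → Nat
  | 0, _ => s.length
  | fuel + 1, i =>
    let j := PySem.Chars.findFrom s rem (i : Int)
    if j < 0 ∨ (s.length : Int) ≤ j then s.length
    else if PySem.Chars.startswith (s.drop j.toNat) incl then pvFindOff s rem incl fuel (j.toNat + 1)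
    else j.toNat

-- _find_on: single string.find(include_delim, i), -1 / past-end mapped to len as in Source B.
def pvFindOn (s incl : List Char) (i : Nat) : Nat :=
  let j := PySem.Chars.findFrom s incl (i : Int)
  if j < 0 ∨ (s.length : Int) ≤ j then s.length else j.toNat

-- main while-True loop of Source B, ported with fuel (i strictly increases each pass).
def pvBLoop (s rem incl : List Char) : Nat → Nat → List Char
  | 0, _ => []
  | fuel + 1, i =>
    let j := pvFindOff s rem incl (s.length + 1) i
    let part := PySem.List.slice s (some (i : Int)) (some (j : Int))  -- string[i:j]
    if s.length ≤ j then part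
    else
      let k := pvFindOn s incl j
      if s.length ≤ k then part
      else part ++ pvBLoop s rem incl fuel k

def remove_between_alt (string : String) (remove_delim : String) (include_delim : String) : String :=
  let s := string.toList
  String.ofList (pvBLoop s remove_delim.toList include_delim.toList (s.length + 1) 0)

-- ===== PRECONDITION & SPEC =====
def Spec_remove_between (string : String) (remove_delim : String) (include_delim : String) (out : String) : Prop := out = remove_between_alt string remove_delim include_delim
instance (string : String) (remove_delim : String) (include_delim : String) (out : String) : Decidable (Spec_remove_between string remove_delim include_delim out) := by unfold Spec_remove_between; infer_instance

-- ===== CLAIM (what is proved, stated in full; the proofs are below) =====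
def Claim_equal_remove_between : Prop := ∀ (string : String) (remove_delim : String) (include_delim : String), Dom_remove_between string remove_delim include_delim → Spec_remove_between string remove_delim include_delim (remove_between string remove_delim include_delim)

-- ===== LEMMAS AND PROOFS =====

-- The state machine of A, written as a recursion on the string position (proof-side only).
def pvAH (s rem incl : List Char) (i : Nat) (b : Bool) : List Char :=
  if h : i < s.length then
    let b1 := if PySem.Chars.startswith (s.drop i) rem then false else b
    let b2 := if PySem.Chars.startswith (s.drop i) incl then true else b1
    (if b2 then [s[i]] else []) ++ pvAH s rem incl (i + 1) b2
  else []
termination_by s.length - i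

-- a "toggle-off" position: remove_delim matches, include_delim does not
def pvOff (s rem incl : List Char) (t : Nat) : Prop :=
  rem <+: s.drop t ∧ ¬ incl <+: s.drop t

lemma pvAH_ge (s rem incl : List Char) (i : Nat) (b : Bool) (h : s.length ≤ i) :
    pvAH s rem incl i b = [] := by
  unfold pvAH; rw [dif_neg (by omega)]

lemma pvAH_step_true (s rem incl : List Char) (i : Nat) (hi : i < s.length)
    (hoff : ¬ pvOff s rem incl i) :
    pvAH s rem incl i true = s[i] :: pvAH s rem incl (i + 1) true := by
  conv_lhs => rw [pvAH]
  rw [dif_pos hi]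
  rcases not_and_or.mp hoff with h | h
  · have hr : PySem.Chars.startswith (s.drop i) rem = false := by
      rw [Bool.eq_false_iff]; intro hc; exact h ((PySem.Chars.startswith_iff _ _).mp hc)
    simp [hr]
  · have hc : PySem.Chars.startswith (s.drop i) incl = true :=
      (PySem.Chars.startswith_iff _ _).mpr (not_not.mp h)
    simp [hc]

lemma pvAH_step_off (s rem incl : List Char) (i : Nat) (hi : i < s.length)
    (hoff : pvOff s rem incl i) :
    pvAH s rem incl i true = pvAH s rem incl (i + 1) false := by
  conv_lhs => rw [pvAH]
  rw [dif_pos hi]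
  have hr : PySem.Chars.startswith (s.drop i) rem = true :=
    (PySem.Chars.startswith_iff _ _).mpr hoff.1
  have hc : PySem.Chars.startswith (s.drop i) incl = false := by
    rw [Bool.eq_false_iff]; intro h; exact hoff.2 ((PySem.Chars.startswith_iff _ _).mp h)
  simp [hr, hc]

lemma pvAH_step_false (s rem incl : List Char) (i : Nat) (hi : i < s.length)
    (hinc : ¬ incl <+: s.drop i) :
    pvAH s rem incl i false = pvAH s rem incl (i + 1) false := by
  conv_lhs => rw [pvAH]
  rw [dif_pos hi]
  have hc : PySem.Chars.startswith (s.drop i) incl = false := by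
    rw [Bool.eq_false_iff]; intro h; exact hinc ((PySem.Chars.startswith_iff _ _).mp h)
  simp [hc]

lemma pvAH_false_on (s rem incl : List Char) (i : Nat) (hi : i < s.length)
    (hinc : incl <+: s.drop i) :
    pvAH s rem incl i false = pvAH s rem incl i true := by
  have hc : PySem.Chars.startswith (s.drop i) incl = true :=
    (PySem.Chars.startswith_iff _ _).mpr hinc
  conv_lhs => rw [pvAH]
  conv_rhs => rw [pvAH]
  rw [dif_pos hi, dif_pos hi]; simp [hc]

-- included chunk: no toggle-off in [i, j) ⇒ A emits s[i:j] then continues at j still including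
lemma pvAH_chunk_true (s rem incl : List Char) (j : Nat) (hj : j ≤ s.length) :
    ∀ i, i ≤ j → (∀ t, i ≤ t → t < j → ¬ pvOff s rem incl t) →
    pvAH s rem incl i true = (s.drop i).take (j - i) ++ pvAH s rem incl j true := by
  intro i hij hno
  induction hd : j - i generalizing i with
  | zero =>
      have : i = j := by omega
      subst this; simp
  | succ m ih =>
      have hij2 : i < j := by omega
      have hi : i < s.length := by omega
      rw [pvAH_step_true s rem incl i hi (hno i le_rfl hij2),
          ih (i + 1) (by omega) (fun t ht1 ht2 => hno t (by omega) ht2) (by omega)]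
      rw [List.drop_eq_getElem_cons hi, List.take_succ_cons]
      simp

-- excluded chunk: no include-match in [i, j) ⇒ A emits nothing from i to j
lemma pvAH_chunk_false (s rem incl : List Char) (j : Nat) (hj : j ≤ s.length) :
    ∀ i, i ≤ j → (∀ t, i ≤ t → t < j → ¬ incl <+: s.drop t) →
    pvAH s rem incl i false = pvAH s rem incl j false := by
  intro i hij hno
  induction hd : j - i generalizing i with
  | zero =>
      have hij' : i = j := by omega
      rw [hij']
  | succ m ih =>
      have hi : i < s.length := by omega
      rw [pvAH_step_false s rem incl i hi (hno i le_rfl (by omega)),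
          ih (i + 1) (by omega) (fun t ht1 ht2 => hno t (by omega) ht2) (by omega)]

-- ¬(sub infix of s.drop i) spreads to every position t ≥ i
lemma pvNoPrefix_of_noInfix (s sub : List Char) (i t : Nat) (hit : i ≤ t)
    (h : ¬ sub <:+: s.drop i) : ¬ sub <+: s.drop t := by
  intro hp
  apply h
  have hsuf : s.drop t <:+ s.drop i := by
    have : s.drop t = (s.drop i).drop (t - i) := by
      rw [List.drop_drop]; congr 1; omega
    rw [this]; exact List.drop_suffix _ _
  exact hp.isInfix.trans hsuf.isInfix

-- characterization of pvFindOff: first toggle-off position in [i, n), else n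
lemma pvFindOff_spec (s rem incl : List Char) :
    ∀ fuel i, i ≤ s.length → s.length + 1 ≤ fuel + i →
    i ≤ pvFindOff s rem incl fuel i ∧ pvFindOff s rem incl fuel i ≤ s.length ∧
    (pvFindOff s rem incl fuel i < s.length → pvOff s rem incl (pvFindOff s rem incl fuel i)) ∧
    (∀ t, i ≤ t → t < pvFindOff s rem incl fuel i → ¬ pvOff s rem incl t) := by
  intro fuel
  induction fuel with
  | zero => intro i hi hf; omega
  | succ fuel ih =>
      intro i hi hf
      unfold pvFindOff
      by_cases hneg : PySem.Chars.findFrom s rem (i : Int) = -1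
      · rw [if_pos (by rw [hneg]; left; norm_num)]
        have hno := (PySem.Chars.findFrom_natCast_eq_neg_one_iff s rem i hi).mp hneg
        exact ⟨hi, le_rfl, fun h => absurd h (by omega),
          fun t ht1 ht2 => fun hofft => pvNoPrefix_of_noInfix s rem i t ht1 hno hofft.1⟩
      · obtain ⟨hge, hpre, hmin⟩ := PySem.Chars.findFrom_natCast_spec s rem i hi hneg
        set j := PySem.Chars.findFrom s rem (i : Int) with hjdef
        have hj0 : 0 ≤ j := le_trans (by positivity) hge
        by_cases hbig : (s.length : Int) ≤ j
        · rw [if_pos (Or.inr hbig)]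
          refine ⟨hi, le_rfl, fun h => absurd h (by omega), fun t ht1 ht2 hofft => ?_⟩
          exact hmin t ht1 (by omega) hofft.1
        · rw [if_neg (by push Not; constructor <;> omega)]
          have hjn : j.toNat < s.length := by omega
          have hij : i ≤ j.toNat := by omega
          by_cases hskip : PySem.Chars.startswith (s.drop j.toNat) incl = true
          · rw [if_pos hskip]
            have hinclj := (PySem.Chars.startswith_iff _ _).mp hskip
            obtain ⟨h1, h2, h3, h4⟩ := ih (j.toNat + 1) (by omega) (by omega)
            refine ⟨by omega, h2, h3, fun t ht1 ht2 hofft => ?_⟩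
            rcases lt_trichotomy t j.toNat with h | h | h
            · exact hmin t ht1 h hofft.1
            · exact hofft.2 (h ▸ hinclj)
            · exact h4 t (by omega) ht2 hofft
          · rw [if_neg hskip]
            refine ⟨hij, by omega, fun _ => ⟨hpre, fun hc => hskip ((PySem.Chars.startswith_iff _ _).mpr hc)⟩,
              fun t ht1 ht2 hofft => hmin t ht1 ht2 hofft.1⟩

-- characterization of pvFindOn: first include-match in [i, n), else n
lemma pvFindOn_spec (s incl : List Char) (i : Nat) (hi : i ≤ s.length) :
    i ≤ pvFindOn s incl i ∧ pvFindOn s incl i ≤ s.length ∧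
    (pvFindOn s incl i < s.length → incl <+: s.drop (pvFindOn s incl i)) ∧
    (∀ t, i ≤ t → t < pvFindOn s incl i → ¬ incl <+: s.drop t) := by
  unfold pvFindOn
  by_cases hneg : PySem.Chars.findFrom s incl (i : Int) = -1
  · rw [if_pos (by rw [hneg]; left; norm_num)]
    have hno := (PySem.Chars.findFrom_natCast_eq_neg_one_iff s incl i hi).mp hneg
    exact ⟨hi, le_rfl, fun h => absurd h (by omega),
      fun t ht1 ht2 => pvNoPrefix_of_noInfix s incl i t ht1 hno⟩
  · obtain ⟨hge, hpre, hmin⟩ := PySem.Chars.findFrom_natCast_spec s incl i hi hneg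
    set j := PySem.Chars.findFrom s incl (i : Int) with hjdef
    have hj0 : 0 ≤ j := le_trans (by positivity) hge
    by_cases hbig : (s.length : Int) ≤ j
    · rw [if_pos (Or.inr hbig)]
      exact ⟨hi, le_rfl, fun h => absurd h (by omega), fun t ht1 ht2 => hmin t ht1 (by omega)⟩
    · rw [if_neg (by push Not; constructor <;> omega)]
      exact ⟨by omega, by omega, fun _ => hpre, fun t ht1 ht2 => hmin t ht1 ht2⟩

-- B's main loop computes exactly A's state machine from an including position
lemma pvBLoop_eq_pvAH (s rem incl : List Char) :
    ∀ fuel i, i ≤ s.length → s.length + 1 ≤ fuel + i →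
    pvBLoop s rem incl fuel i = pvAH s rem incl i true := by
  intro fuel
  induction fuel with
  | zero => intro i hi hf; omega
  | succ fuel ih =>
      intro i hi hf
      unfold pvBLoop
      obtain ⟨hj1, hj2, hjoff, hjmin⟩ :=
        pvFindOff_spec s rem incl (s.length + 1) i hi (by omega)
      set j := pvFindOff s rem incl (s.length + 1) i with hjdef
      have hslice : PySem.List.slice s (some (i : Int)) (some (j : Int))
          = (s.drop i).take (j - i) := PySem.List.slice_natCast s i j
      have hchunk := pvAH_chunk_true s rem incl j hj2 i hj1 hjmin
      by_cases hend : s.length ≤ j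
      · rw [if_pos hend, hchunk, pvAH_ge s rem incl j true (by omega), hslice]
        simp
      · rw [if_neg hend]
        push Not at hend
        obtain ⟨hk1, hk2, hkon, hkmin⟩ := pvFindOn_spec s incl j (by omega)
        set k := pvFindOn s incl j with hkdef
        have hoffj := hjoff hend
        have hstep := pvAH_step_off s rem incl j hend hoffj
        have hkj : j + 1 ≤ k := by
          rcases eq_or_lt_of_le hk1 with h | h
          · exact absurd (hkon (h ▸ hend)) (h ▸ hoffj.2)
          · omega
        have hchunk2 := pvAH_chunk_false s rem incl k hk2 (j + 1) hkj
          (fun t ht1 ht2 => hkmin t (by omega) ht2)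
        by_cases hend2 : s.length ≤ k
        · rw [if_pos hend2, hchunk, hstep, hchunk2,
            pvAH_ge s rem incl k false (by omega), hslice]
          simp
        · rw [if_neg hend2]
          push Not at hend2
          rw [hchunk, hstep, hchunk2, pvAH_false_on s rem incl k hend2 (hkon hend2),
            ← ih k (by omega) (by omega), hslice]

-- A's foldl over range(0, len) equals the state machine pvAH
lemma pvFold_eq_pvAH (s rem incl : List Char) :
    ∀ i b acc, i ≤ s.length →
    ((PySem.List.pyRange (i : Int) (s.length : Int) 1).foldl
      (pvAStep s rem incl) (b, acc)).2 = acc ++ pvAH s rem incl i b := by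
  intro i b acc hi
  induction hd : s.length - i generalizing i b acc with
  | zero =>
      have : (PySem.List.pyRange (i : Int) (s.length : Int) 1) = [] := by
        simp [PySem.List.pyRange]; omega
      rw [this, pvAH_ge s rem incl i b (by omega)]; simp
  | succ m ih =>
      have hlt : i < s.length := by omega
      rw [PySem.List.pyRange_one_cons (by exact_mod_cast hlt)]
      have hcast : ((i : Int) + 1) = ((i + 1 : Nat) : Int) := by push_cast; ring
      have htn : ((i : Int)).toNat = i := Int.toNat_natCast i
      have hget : (PySem.List.pyGet? s (i : Int)).toList = [s[i]] := by
        rw [PySem.List.pyGet?_natCast]; simp [List.getElem?_eq_getElem hlt]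
      set B2 := (if PySem.Chars.startswith (s.drop i) incl then true
                 else if PySem.Chars.startswith (s.drop i) rem then false else b) with hB2
      have hAH : pvAH s rem incl i b =
          (if B2 then [s[i]] else []) ++ pvAH s rem incl (i + 1) B2 := by
        conv_lhs => rw [pvAH]
        rw [dif_pos hlt]
      have hstate : pvAStep s rem incl (b, acc) (i : Int)
          = (B2, if B2 then acc ++ [s[i]] else acc) := by
        simp only [pvAStep, htn, hget, hB2]
        by_cases hC : PySem.Chars.startswith (s.drop i) incl = true <;>
          by_cases hR : PySem.Chars.startswith (s.drop i) rem = true <;>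
          by_cases hb : b = true <;>
          simp [hC, hR, hb]
      rw [List.foldl_cons, hstate, hcast, ih (i + 1) B2 _ (by omega) (by omega), hAH]
      by_cases h2 : B2 = true <;> simp [h2]

-- ===== VERDICT (by name: the statement is the Claim_ definition above) =====
theorem remove_between_spec : Claim_equal_remove_between := by
  intro string remove_delim include_delim _
  unfold Spec_remove_between remove_between remove_between_alt
  simp only []
  rw [show (0 : Int) = ((0 : Nat) : Int) from rfl, pvFold_eq_pvAH string.toList remove_delim.toList include_delim.toList 0 true [] (by omega),
    pvBLoop_eq_pvAH string.toList remove_delim.toList include_delim.toList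
      (string.toList.length + 1) 0 (by omega) (by omega)]
  simp
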